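-- pv_equiv track=rewrite | github.com/binchen4110/TAME | rgcn/utils.py | get_tail_neighbor
-- ===== SOURCE A (Python) =====
-- def get_tail_neighbor(neighbors):
--     a_num_dict = {}
--     for key, value in neighbors.items():
--         one_hop_list = value['1_hop']
--         a_num = len(one_hop_list)
--         a_num_dict[key] = a_num
--     sorted_list = sorted(a_num_dict.items(), key=lambda x: x[1], reverse=True)
--     sorted_list = [x for x in sorted_list if x[1] != 0]
--     total_num = len(sorted_list)
--     keep_num = total_num // 2
--     keep_list = [item[0] for item in sorted_list if item[1] <= 2]
--     new_neighbors = {key: value for key, value in neighbors.items() if key in keep_list}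
--     return new_neighbors
-- ===== SOURCE B (Python) =====
-- def get_tail_neighbor(neighbors):
--     return {key: value for key, value in neighbors.items()
--             if 1 <= len(value['1_hop']) <= 2}
-- ===== Notes on version B (the rewrite author's own statement) =====
-- stated objective: simpler
-- what changed: Replaces A's build-a-counts-dict, sort-by-count, build-keep-list, membership-filter pipeline with a single filter pass that keeps an entry exactly when its '1_hop' list has length 1 or 2; Pre_ excludes association lists with duplicate outer or inner keys (they represent no Python dict) and inputs whose values lack the '1_hop' key (A raises KeyError there).
import Mathlib
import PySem

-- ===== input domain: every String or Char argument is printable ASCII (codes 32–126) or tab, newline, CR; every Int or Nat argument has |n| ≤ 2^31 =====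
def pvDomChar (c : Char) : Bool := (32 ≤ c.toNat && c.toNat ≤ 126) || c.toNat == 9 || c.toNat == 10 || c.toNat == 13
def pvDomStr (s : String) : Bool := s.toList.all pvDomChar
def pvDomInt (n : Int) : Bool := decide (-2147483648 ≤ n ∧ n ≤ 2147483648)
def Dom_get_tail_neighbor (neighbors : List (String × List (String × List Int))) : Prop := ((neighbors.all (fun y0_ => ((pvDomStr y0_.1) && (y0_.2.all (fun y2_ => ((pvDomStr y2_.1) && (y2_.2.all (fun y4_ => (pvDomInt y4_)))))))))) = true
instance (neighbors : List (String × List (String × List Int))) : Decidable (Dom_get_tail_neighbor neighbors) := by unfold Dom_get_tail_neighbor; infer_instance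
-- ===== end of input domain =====

-- B replaces A's build-counts-dict / sort / keep-list-membership pipeline by one direct
-- filter pass keeping entries whose '1_hop' list has length 1 or 2 (objective: simpler).

-- ===== PORT A =====
def get_tail_neighbor (neighbors : List (String × List (String × List Int))) : List (String × List (String × List Int)) :=
  let a_num_dict : PySem.Dict String Int :=
    neighbors.foldl (fun d kv =>
      -- value['1_hop']: none = KeyError, excluded by Pre_
      let one_hop_list := ((PySem.Dict.mk kv.2).get? "1_hop").getD []
      let a_num : Int := (one_hop_list.length : Int)
      d.insert kv.1 a_num) PySem.Dict.empty
  let sorted_list := PySem.List.sorted a_num_dict.items (fun x => x.2) true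
  let sorted_list := sorted_list.filter (fun x => decide (x.2 ≠ 0))
  let total_num : Int := (sorted_list.length : Int)
  let _keep_num : Int := PySem.Int.floordiv total_num 2   -- keep_num (unused in A)
  let keep_list := (sorted_list.filter (fun item => decide (item.2 ≤ 2))).map (fun item => item.1)
  let new_neighbors : PySem.Dict String (List (String × List Int)) :=
    neighbors.foldl (fun d kv => if keep_list.contains kv.1 then d.insert kv.1 kv.2 else d) PySem.Dict.empty
  new_neighbors.items

-- ===== PORT B =====
def get_tail_neighbor_alt (neighbors : List (String × List (String × List Int))) : List (String × List (String × List Int)) :=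
  neighbors.filter (fun kv =>
    -- value['1_hop']: none = KeyError, excluded by Pre_
    let n := (((PySem.Dict.mk kv.2).get? "1_hop").getD []).length
    decide (1 ≤ n ∧ n ≤ 2))

-- ===== PRECONDITION & SPEC =====
-- Pre_ excludes (i) association lists with duplicate outer or inner keys, which do not
-- represent any Python dict input, and (ii) inputs where some value lacks the '1_hop'
-- key, on which A raises KeyError.
def Pre_get_tail_neighbor (neighbors : List (String × List (String × List Int))) : Prop :=
  (neighbors.map Prod.fst).Nodup ∧
  ∀ kv ∈ neighbors, (kv.2.map Prod.fst).Nodup ∧ "1_hop" ∈ kv.2.map Prod.fst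
instance (neighbors : List (String × List (String × List Int))) : Decidable (Pre_get_tail_neighbor neighbors) := by unfold Pre_get_tail_neighbor; infer_instance

def pvWitness_get_tail_neighbor : (List (String × List (String × List Int))) :=
  [("a", [("1_hop", [1])]), ("b", [("1_hop", [1, 2, 3])])]

def Spec_get_tail_neighbor (neighbors : List (String × List (String × List Int))) (out : List (String × List (String × List Int))) : Prop := out = get_tail_neighbor_alt neighbors
instance (neighbors : List (String × List (String × List Int))) (out : List (String × List (String × List Int))) : Decidable (Spec_get_tail_neighbor neighbors out) := by unfold Spec_get_tail_neighbor; infer_instance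

-- ===== CLAIM (what is proved, stated in full; the proofs are below) =====
def Claim_equal_get_tail_neighbor : Prop := ∀ (neighbors : List (String × List (String × List Int))), Dom_get_tail_neighbor neighbors → Pre_get_tail_neighbor neighbors → Spec_get_tail_neighbor neighbors (get_tail_neighbor neighbors)

-- ===== LEMMAS AND PROOFS =====

-- a conditional-insert fold is the fold over the filtered list
theorem foldl_if_eq_foldl_filter {α β : Type} (p : α → Bool) (g : β → α → β)
    (l : List α) (init : β) :
    l.foldl (fun d x => if p x then g d x else d) init = (l.filter p).foldl g init := by
  induction l generalizing init with
  | nil => rfl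
  | cons a t ih =>
    by_cases h : p a <;> simp [List.foldl, List.filter, h, ih]

-- ===== VERDICT (by name: the statement is the Claim_ definition above) =====
theorem get_tail_neighbor_spec : Claim_equal_get_tail_neighbor := by
  intro neighbors _ hpre
  obtain ⟨hnd, _⟩ := hpre
  -- abbreviations: the per-entry count and B's predicate
  set cnt : (String × List (String × List Int)) → Int :=
    fun kv => ((((PySem.Dict.mk kv.2).get? "1_hop").getD []).length : Int) with hcnt
  set p : (String × List (String × List Int)) → Bool := fun kv =>
    decide (1 ≤ (((PySem.Dict.mk kv.2).get? "1_hop").getD []).length ∧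
            (((PySem.Dict.mk kv.2).get? "1_hop").getD []).length ≤ 2) with hp
  set KL : List String :=
    List.map (fun item => item.1)
      (List.filter (fun item => decide (item.2 ≤ 2))
        (List.filter (fun x => decide (x.2 ≠ 0))
          (PySem.List.sorted (neighbors.map (fun kv => (kv.1, cnt kv))) (fun x => x.2) true))) with hKL
  -- the membership test in A's last loop agrees with B's predicate on every entry
  have hkeep : ∀ kv ∈ neighbors, KL.contains kv.1 = p kv := by
    intro kv hkv
    have hmem : kv.1 ∈ KL ↔
        (1 ≤ (((PySem.Dict.mk kv.2).get? "1_hop").getD []).length ∧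
         (((PySem.Dict.mk kv.2).get? "1_hop").getD []).length ≤ 2) := by
      rw [hKL]
      constructor
      · intro h
        obtain ⟨x, hx, hx1⟩ := List.mem_map.1 h
        have hx2 := List.mem_filter.1 hx
        have hx3 := List.mem_filter.1 hx2.1
        have hx4 : x ∈ neighbors.map (fun kv => (kv.1, cnt kv)) :=
          (PySem.List.mem_sorted _ _ _ _).1 hx3.1
        obtain ⟨kv', hkv', hx5⟩ := List.mem_map.1 hx4
        have hkk : kv' = kv := by
          apply List.inj_on_of_nodup_map hnd hkv' hkv
          have hfst : x.1 = kv'.1 := by rw [← hx5]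
          simpa [hfst] using hx1
        subst hkk
        have h0 : x.2 ≠ 0 := by simpa using hx3.2
        have h2 : x.2 ≤ 2 := by simpa using hx2.2
        rw [← hx5] at h0 h2
        simp only [hcnt] at h0 h2
        omega
      · intro h
        refine List.mem_map.2 ⟨(kv.1, cnt kv), ?_, rfl⟩
        refine List.mem_filter.2 ⟨List.mem_filter.2 ⟨?_, ?_⟩, ?_⟩
        · exact (PySem.List.mem_sorted _ _ _ _).2 (List.mem_map.2 ⟨kv, hkv, rfl⟩)
        · dsimp only; simp only [hcnt, decide_eq_true_eq]; omega
        · dsimp only; simp only [hcnt, decide_eq_true_eq]; omega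
    by_cases h : (1 ≤ (((PySem.Dict.mk kv.2).get? "1_hop").getD []).length ∧
         (((PySem.Dict.mk kv.2).get? "1_hop").getD []).length ≤ 2)
    · simp [hp, hmem.2 h, h]
    · have hnm : kv.1 ∉ KL := fun hc => h (hmem.1 hc)
      simp [hp, hnm]
      omega
  have hfun : ∀ (acc : PySem.Dict String (List (String × List Int))) kv, kv ∈ neighbors →
      (if KL.contains kv.1 then acc.insert kv.1 kv.2 else acc)
      = (if p kv then acc.insert kv.1 kv.2 else acc) := by
    intro acc kv h; rw [hkeep kv h]
  -- Step 1: the counts dict is just the map over neighbors (fresh distinct keys)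
  have hitems :
      (neighbors.foldl (fun d kv =>
        let one_hop_list := ((PySem.Dict.mk kv.2).get? "1_hop").getD []
        let a_num : Int := (one_hop_list.length : Int)
        d.insert kv.1 a_num) (PySem.Dict.empty : PySem.Dict String Int)).items
        = neighbors.map (fun kv => (kv.1, cnt kv)) := by
    have h := PySem.Dict.items_foldl_insert_fresh (l := neighbors)
      (k := fun kv => kv.1) (v := cnt) (d := (PySem.Dict.empty : PySem.Dict String Int))
      (by intro a _; exact PySem.Dict.contains_empty _)
      (by simpa using hnd)
    simpa [hcnt] using h
  unfold Spec_get_tail_neighbor get_tail_neighbor get_tail_neighbor_alt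
  dsimp only
  rw [hitems, ← hKL]
  have hcongr := PySem.List.foldl_congr_mem (l := neighbors)
    (init := (PySem.Dict.empty : PySem.Dict String (List (String × List Int))))
    (f := fun d kv => if KL.contains kv.1 then d.insert kv.1 kv.2 else d)
    (g := fun d kv => if p kv then d.insert kv.1 kv.2 else d) (h := hfun)
  rw [hcongr, foldl_if_eq_foldl_filter]
  -- Step 3: the final insert loop over the filtered entries appends them in order
  have hndf : ((neighbors.filter p).map (fun kv => kv.1)).Nodup := by
    have hsub : ((neighbors.filter p).map (fun kv => kv.1)).Sublist
        (neighbors.map (fun kv => kv.1)) := (List.filter_sublist).map _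
    exact (by simpa using hnd : (neighbors.map (fun kv => kv.1)).Nodup).sublist hsub
  have h := PySem.Dict.items_foldl_insert_fresh (l := neighbors.filter p)
    (k := fun kv => kv.1) (v := fun kv => kv.2)
    (d := (PySem.Dict.empty : PySem.Dict String (List (String × List Int))))
    (by intro a _; exact PySem.Dict.contains_empty _) hndf
  simpa [hp] using h
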